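-- pv_equiv track=rewrite | github.com/jeussantiago/leetcode | python/0321-create-maximum-number.py | maxLexicographical
-- ===== SOURCE A (Python) =====
-- from typing import List
--
-- def maxLexicographical(nums: List[int], k: int) -> List[int]:
--     N = len(nums)
--     stack = []
--     for i, num in enumerate(nums):
--         while stack and num > stack[-1] and k - len(stack) <= N - i - 1:
--             stack.pop()
--
--         if len(stack) < k:
--             stack.append(num)
--
--     return stack
-- ===== SOURCE B (Python) =====
-- from typing import List
--
-- def maxLexicographical(nums: List[int], k: int) -> List[int]:
--     N = len(nums)
--     kk = min(k, N)
--     res = []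
--     start = 0
--     for j in range(kk):
--         end = N - (kk - j) + 1
--         best = start
--         for t in range(start + 1, end):
--             if nums[t] > nums[best]:
--                 best = t
--         res.append(nums[best])
--         start = best + 1
--     return res
-- ===== Notes on version B (the rewrite author's own statement) =====
-- stated objective: alternative
-- what changed: Replaces the monotonic-stack scan (push/pop with a remaining-budget check) by a window-greedy selection: for each of the k output slots, scan the admissible window for the earliest maximum and advance the start pointer past it.
import Mathlib
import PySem

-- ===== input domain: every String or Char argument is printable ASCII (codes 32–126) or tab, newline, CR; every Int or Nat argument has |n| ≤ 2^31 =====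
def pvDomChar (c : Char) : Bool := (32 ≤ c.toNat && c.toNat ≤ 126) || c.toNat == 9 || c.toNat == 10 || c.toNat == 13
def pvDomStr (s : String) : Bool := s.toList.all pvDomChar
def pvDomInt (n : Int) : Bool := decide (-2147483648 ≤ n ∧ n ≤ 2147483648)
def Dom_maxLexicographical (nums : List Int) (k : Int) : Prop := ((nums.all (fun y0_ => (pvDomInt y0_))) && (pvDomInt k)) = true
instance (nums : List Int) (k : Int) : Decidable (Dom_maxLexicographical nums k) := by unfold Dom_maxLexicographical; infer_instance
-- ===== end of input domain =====

-- B replaces A's monotonic-stack scan by a window-greedy selection (different algorithm, similar cost).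

-- ===== PORT A =====
-- The Python stack (append/pop at the end, stack[-1] = top) is represented reversed:
-- head = top of stack; the final `return stack` becomes a `.reverse`.
-- `while stack and num > stack[-1] and k - len(stack) <= N - i - 1: stack.pop()`
def aPop (k N i num : Int) : List Int → List Int
  | [] => []
  | top :: rest =>
      if num > top ∧ k - ((top :: rest).length : Int) ≤ N - i - 1 then
        aPop k N i num rest
      else top :: rest

-- the `for i, num in enumerate(nums)` loop
def aGo (k N : Int) (i : Nat) : List Int → List Int → List Int
  | stack, [] => stack
  | stack, num :: xs =>
      let s1 := aPop k N (i : Int) num stack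
      let s2 := if (s1.length : Int) < k then num :: s1 else s1
      aGo k N (i + 1) s2 xs

def maxLexicographical (nums : List Int) (k : Int) : List Int :=
  (aGo k (nums.length : Int) 0 [] nums).reverse

-- ===== PORT B =====
-- inner loop `for t in range(start+1, end): if nums[t] > nums[best]: best = t`
-- (all indices are in range when reached, so List.getD matches Python indexing exactly)
def bestIdx (nums : List Int) (best t e : Nat) : Nat :=
  if t < e then
    bestIdx nums (if nums.getD t 0 > nums.getD best 0 then t else best) (t + 1) e
  else best
termination_by e - t

-- outer loop `for j in range(kk)`, recursing on rem = kk - j; end = N - (kk - j) + 1 = N - rem + 1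
def bLoop (nums : List Int) (N : Nat) : Nat → Nat → List Int
  | _, 0 => []
  | start, rem + 1 =>
      let e := N - (rem + 1) + 1
      let best := bestIdx nums start (start + 1) e
      nums.getD best 0 :: bLoop nums N (best + 1) rem

def maxLexicographical_alt (nums : List Int) (k : Int) : List Int :=
  let N := nums.length
  let kk := (min k (N : Int)).toNat   -- range(kk) is empty for kk ≤ 0
  bLoop nums N 0 kk

-- ===== PRECONDITION & SPEC =====
def Spec_maxLexicographical (nums : List Int) (k : Int) (out : List Int) : Prop := out = maxLexicographical_alt nums k
instance (nums : List Int) (k : Int) (out : List Int) : Decidable (Spec_maxLexicographical nums k out) := by unfold Spec_maxLexicographical; infer_instance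

-- ===== CLAIM (what is proved, stated in full; the proofs are below) =====
def Claim_equal_maxLexicographical : Prop := ∀ (nums : List Int) (k : Int), Dom_maxLexicographical nums k → Spec_maxLexicographical nums k (maxLexicographical nums k)

-- ===== LEMMAS AND PROOFS =====

-- k ≤ 0: A never appends, the stack stays empty
theorem aGo_nonpos (k N : Int) (hk : k ≤ 0) : ∀ (xs : List Int) (i : Nat),
    aGo k N i [] xs = [] := by
  intro xs
  induction xs with
  | nil => intro i; rfl
  | cons x xs ih =>
      intro i
      have hlt : ¬ (((aPop k N (i : Int) x []).length : Int) < k) := by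
        simp [aPop]; omega
      simp only [aGo, hlt]
      exact ih (i + 1)

-- N ≤ k: A pops nothing and appends everything
theorem aGo_ge (k N : Int) (hk : N ≤ k) : ∀ (xs : List Int) (i : Nat) (stack : List Int),
    (i : Int) + xs.length = N → (stack.length : Int) = (i : Int) →
    aGo k N i stack xs = xs.reverse ++ stack := by
  intro xs
  induction xs with
  | nil => intro i stack _ _; simp [aGo]
  | cons x xs ih =>
      intro i stack hN hlen
      have hpop : aPop k N (i : Int) x stack = stack := by
        cases stack with
        | nil => rfl
        | cons top rest =>
            have : ¬ (x > top ∧ k - (((top :: rest).length : Int)) ≤ N - (i : Int) - 1) := by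
              intro h
              obtain ⟨_, h2⟩ := h
              simp only [List.length_cons] at hN
              push_cast at hN
              omega
            rw [aPop, if_neg this]
      have happ : ((stack.length : Int) < k) := by
        simp at hN; omega
      simp only [aGo, hpop, happ, if_pos]
      rw [ih (i + 1) (x :: stack) (by simp at hN ⊢; omega) (by simp at hlen ⊢; omega)]
      simp

-- bLoop over the whole list returns the suffix from start
theorem bLoop_full (nums : List Int) : ∀ (rem start : Nat), start + rem = nums.length →
    bLoop nums nums.length start rem = nums.drop start := by
  intro rem
  induction rem with
  | zero =>
      intro start h
      have hs : start = nums.length := by omega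
      rw [hs, List.drop_length]
      rfl
  | succ r ih =>
      intro start h
      have he : nums.length - (r + 1) + 1 = start + 1 := by omega
      have hb : bestIdx nums start (start + 1) (start + 1) = start := by
        rw [bestIdx]; simp
      have hs : start < nums.length := by omega
      rw [bLoop, he, hb, ih (start + 1) (by omega)]
      rw [List.drop_eq_getElem_cons hs]
      simp [List.getD_eq_getElem?_getD, hs]

-- the inner-scan invariant: bestIdx returns the earliest index of the maximum of nums[lo:e]
theorem bestIdx_spec (nums : List Int) (lo : Nat) : ∀ (n t best e : Nat), e = t + n →
    lo ≤ best → best < t →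
    (∀ j, lo ≤ j → j < t → nums.getD j 0 ≤ nums.getD best 0) →
    (∀ j, lo ≤ j → j < best → nums.getD j 0 < nums.getD best 0) →
    (lo ≤ bestIdx nums best t e ∧ bestIdx nums best t e < e) ∧
    (∀ j, lo ≤ j → j < e → nums.getD j 0 ≤ nums.getD (bestIdx nums best t e) 0) ∧
    (∀ j, lo ≤ j → j < bestIdx nums best t e → nums.getD j 0 < nums.getD (bestIdx nums best t e) 0) := by
  intro n
  induction n with
  | zero =>
      intro t best e he hlo hbt H1 H2
      have ht : ¬ t < e := by omega
      rw [bestIdx, if_neg ht]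
      exact ⟨⟨hlo, by omega⟩, fun j h1 h2 => H1 j h1 (by omega), H2⟩
  | succ n ih =>
      intro t best e he hlo hbt H1 H2
      have ht : t < e := by omega
      rw [bestIdx, if_pos ht]
      by_cases hc : nums.getD t 0 > nums.getD best 0
      · rw [if_pos hc]
        refine ih (t + 1) t e (by omega) (by omega) (by omega) ?_ ?_
        · intro j h1 h2
          rcases Nat.lt_or_ge j t with hj | hj
          · exact le_of_lt (lt_of_le_of_lt (H1 j h1 hj) hc)
          · have : j = t := by omega
            subst this; exact le_refl _
        · intro j h1 h2
          exact lt_of_le_of_lt (H1 j h1 h2) hc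
      · rw [if_neg hc]
        refine ih (t + 1) best e (by omega) hlo (by omega) ?_ H2
        intro j h1 h2
        rcases Nat.lt_or_ge j t with hj | hj
        · exact H1 j h1 hj
        · have : j = t := by omega
          subst this; omega

-- corollary in the form the outer loop uses (best = start, t = start + 1)
theorem bestIdx_window (nums : List Int) (start e : Nat) (h : start < e) :
    (start ≤ bestIdx nums start (start + 1) e ∧ bestIdx nums start (start + 1) e < e) ∧
    (∀ j, start ≤ j → j < e → nums.getD j 0 ≤ nums.getD (bestIdx nums start (start + 1) e) 0) ∧
    (∀ j, start ≤ j → j < bestIdx nums start (start + 1) e →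
        nums.getD j 0 < nums.getD (bestIdx nums start (start + 1) e) 0) := by
  refine bestIdx_spec nums start (e - (start + 1)) (start + 1) start e (by omega) (le_refl _) (by omega) ?_ (by omega)
  intro j h1 h2
  have : j = start := by omega
  subst this; exact le_refl _

theorem getD_drop (nums : List Int) (d t : Nat) (h : d ≤ t) :
    (nums.drop d).getD (t - d) 0 = nums.getD t 0 := by
  have h2 : d + (t - d) = t := by omega
  simp only [List.getD_eq_getElem?_getD, List.getElem?_drop, h2]

-- bestIdx commutes with dropping a prefix
theorem bestIdx_shift (nums : List Int) (d : Nat) : ∀ (n t best e : Nat), e = t + n →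
    d ≤ best → d ≤ t →
    bestIdx (nums.drop d) (best - d) (t - d) (e - d) = bestIdx nums best t e - d := by
  intro n
  induction n with
  | zero =>
      intro t best e he hd1 hd2
      have ht : ¬ t < e := by omega
      have ht' : ¬ t - d < e - d := by omega
      conv_lhs => rw [bestIdx]
      conv_rhs => rw [bestIdx]
      rw [if_neg ht', if_neg ht]
  | succ n ih =>
      intro t best e he hd1 hd2
      have ht : t < e := by omega
      have ht' : t - d < e - d := by omega
      conv_lhs => rw [bestIdx]
      conv_rhs => rw [bestIdx]
      rw [if_pos ht', if_pos ht]
      rw [getD_drop nums d t hd2, getD_drop nums d best hd1]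
      have h1 : t - d + 1 = (t + 1) - d := by omega
      by_cases hc : nums.getD t 0 > nums.getD best 0
      · rw [if_pos hc, if_pos hc, h1]
        exact ih (t + 1) t e (by omega) hd2 (by omega)
      · rw [if_neg hc, if_neg hc, h1]
        exact ih (t + 1) best e (by omega) hd1 (by omega)

-- bLoop commutes with dropping a prefix of length d ≤ start
theorem bLoop_shift (nums : List Int) : ∀ (rem start d : Nat), d ≤ start →
    start + rem ≤ nums.length →
    bLoop nums nums.length start rem = bLoop (nums.drop d) (nums.length - d) (start - d) rem := by
  intro rem
  induction rem with
  | zero => intro start d _ _; rfl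
  | succ r ih =>
      intro start d hd hle
      have hrem : r + 1 ≤ nums.length := by omega
      have he : nums.length - (r + 1) + 1 = nums.length - r := by omega
      have he' : nums.length - d - (r + 1) + 1 = nums.length - r - d := by omega
      set e := nums.length - r with hee
      have hse : start < e := by omega
      obtain ⟨⟨hm1, hm2⟩, _, _⟩ := bestIdx_window nums start e hse
      set m := bestIdx nums start (start + 1) e with hmm
      rw [bLoop, bLoop]
      rw [he, he']
      have hsh : bestIdx (nums.drop d) (start - d) (start - d + 1) (e - d) = m - d := by
        have h1 : start - d + 1 = (start + 1) - d := by omega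
        rw [h1]
        exact bestIdx_shift nums d (e - (start + 1)) (start + 1) start e (by omega) hd (by omega)
      rw [hsh]
      rw [getD_drop nums d m (by omega)]
      have h2 : m - d + 1 = (m + 1) - d := by omega
      rw [h2, ← ih (m + 1) d (by omega) (by omega)]

-- the pop loop clears a stack whose elements are all below num (budget always satisfied)
theorem aPop_all (k N i num : Int) (hbud : k - 1 ≤ N - i - 1) :
    ∀ stack : List Int, (∀ y ∈ stack, y < num) → aPop k N i num stack = [] := by
  intro stack
  induction stack with
  | nil => intro _; rfl
  | cons top rest ih =>
      intro h
      have hc : num > top ∧ k - (((top :: rest).length : Nat) : Int) ≤ N - i - 1 := by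
        refine ⟨h top (by simp), ?_⟩
        simp only [List.length_cons]
        push_cast
        omega
      rw [aPop, if_pos hc]
      exact ih (fun y hy => h y (by simp [hy]))

-- the pop loop only removes elements
theorem aPop_mem (k N i num : Int) : ∀ (stack : List Int) (y : Int),
    y ∈ aPop k N i num stack → y ∈ stack := by
  intro stack
  induction stack with
  | nil => intro y h; simp [aPop] at h
  | cons top rest ih =>
      intro y h
      rw [aPop] at h
      split at h
      · exact List.mem_cons_of_mem _ (ih y h)
      · exact h

-- Phase 1: up to the chosen index m, the stack only holds values < nums[m];
-- at index m it is cleared and nums[m] is pushed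
theorem phase1 (nums : List Int) (kq m : Nat) (hkq : 0 < kq) (hm : m + kq ≤ nums.length)
    (hstrict : ∀ j, j < m → nums.getD j 0 < nums.getD m 0) :
    ∀ (c j : Nat) (stack : List Int), j + c = m → (∀ y ∈ stack, y < nums.getD m 0) →
    aGo (kq : Int) (nums.length : Int) j stack (nums.drop j) =
    aGo (kq : Int) (nums.length : Int) (m + 1) [nums.getD m 0] (nums.drop (m + 1)) := by
  intro c
  induction c with
  | zero =>
      intro j stack hj hst
      have hj' : j = m := by omega
      rw [hj']
      have hmN : m < nums.length := by omega
      rw [List.drop_eq_getElem_cons hmN]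
      have hget : nums[m] = nums.getD m 0 := by
        simp [List.getD_eq_getElem?_getD, hmN]
      rw [aGo]
      have hpop : aPop (kq : Int) (nums.length : Int) (m : Int) nums[m] stack = [] := by
        apply aPop_all
        · omega
        · rw [hget]; exact hst
      rw [hpop]
      have hlt : ((([] : List Int).length : Int) < (kq : Int)) := by simp; omega
      simp only [hlt, if_pos, hget]
  | succ c ih =>
      intro j stack hj hst
      have hjm : j < m := by omega
      have hjN : j < nums.length := by omega
      rw [List.drop_eq_getElem_cons hjN, aGo]
      have hgetj : nums[j] = nums.getD j 0 := by
        simp [List.getD_eq_getElem?_getD, hjN]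
      have hst1 : ∀ y ∈ aPop (kq : Int) (nums.length : Int) (j : Int) nums[j] stack,
          y < nums.getD m 0 := fun y hy => hst y (aPop_mem _ _ _ _ stack y hy)
      set s1 := aPop (kq : Int) (nums.length : Int) (j : Int) nums[j] stack with hs1
      by_cases hc : ((s1.length : Int) < (kq : Int))
      · rw [if_pos hc]
        refine ih (j + 1) (nums[j] :: s1) (by omega) ?_
        intro y hy
        rcases List.mem_cons.mp hy with h | h
        · subst h; rw [hgetj]; exact hstrict j hjm
        · exact hst1 y h
      · rw [if_neg hc]
        exact ih (j + 1) s1 (by omega) hst1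

-- Phase 2: the chosen value sits at the bottom of the stack and is never popped;
-- the rest of the run is exactly the run of the (k-1)-problem on the dropped list
theorem aPop_shift (kq : Nat) (N m i : Nat) (x num : Int)
    (hstop : ¬ (num > x ∧ (kq : Int) - 1 ≤ (N : Int) - (i : Int) - 1)) :
    ∀ s : List Int,
      aPop (kq : Int) (N : Int) (i : Int) num (s ++ [x]) =
      (aPop ((kq : Int) - 1) ((N : Int) - ((m : Int) + 1)) ((i : Int) - ((m : Int) + 1)) num s) ++ [x] := by
  intro s
  induction s with
  | nil =>
      have hno : ¬ (num > x ∧ (kq : Int) - (((x :: ([] : List Int)).length : Int)) ≤ (N : Int) - (i : Int) - 1) := by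
        intro h
        refine hstop ⟨h.1, ?_⟩
        have h2 := h.2
        simp at h2
        omega
      conv_rhs => rw [aPop]
      simp only [List.nil_append]
      rw [aPop, if_neg hno]
  | cons y rest ih =>
      simp only [List.cons_append, aPop]
      have hcond : (num > y ∧ (kq : Int) - (((y :: (rest ++ [x])).length : Nat) : Int) ≤ (N : Int) - (i : Int) - 1)
          ↔ (num > y ∧ (kq : Int) - 1 - (((y :: rest).length : Nat) : Int) ≤
              (N : Int) - ((m : Int) + 1) - ((i : Int) - ((m : Int) + 1)) - 1) := by
        simp only [List.length_cons, List.length_append, List.length_nil]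
        constructor
        · intro ⟨h1, h2⟩; refine ⟨h1, by push_cast at h2 ⊢; omega⟩
        · intro ⟨h1, h2⟩; refine ⟨h1, by push_cast at h2 ⊢; omega⟩
      by_cases hc : num > y ∧ (kq : Int) - (((y :: (rest ++ [x])).length : Nat) : Int) ≤ (N : Int) - (i : Int) - 1
      · rw [if_pos hc, if_pos (hcond.mp hc)]
        exact ih
      · rw [if_neg hc, if_neg (fun h => hc (hcond.mpr h))]
        simp

theorem phase2 (nums : List Int) (kq m : Nat) (_hkq : 1 ≤ kq) (hm : m + kq ≤ nums.length)
    (hmax : ∀ j, j < nums.length - kq + 1 → nums.getD j 0 ≤ nums.getD m 0) :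
    ∀ (c i : Nat) (s : List Int), i + c = nums.length → m + 1 ≤ i →
    aGo (kq : Int) (nums.length : Int) i (s ++ [nums.getD m 0]) (nums.drop i) =
    (aGo ((kq : Int) - 1) ((nums.length : Int) - ((m : Int) + 1)) (i - (m + 1)) s (nums.drop i))
      ++ [nums.getD m 0] := by
  intro c
  induction c with
  | zero =>
      intro i s hi him
      have : i = nums.length := by omega
      subst this
      rw [List.drop_length]
      rfl
  | succ c ih =>
      intro i s hi him
      have hiN : i < nums.length := by omega
      rw [List.drop_eq_getElem_cons hiN]
      rw [aGo, aGo]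
      have hgeti : nums[i] = nums.getD i 0 := by
        simp [List.getD_eq_getElem?_getD, hiN]
      have hstop : ¬ (nums[i] > nums.getD m 0 ∧ (kq : Int) - 1 ≤ (nums.length : Int) - (i : Int) - 1) := by
        intro ⟨h1, h2⟩
        have hile : i < nums.length - kq + 1 := by omega
        have := hmax i hile
        rw [hgeti] at h1
        omega
      have hidx : ((i - (m + 1) : Nat) : Int) = (i : Int) - ((m : Int) + 1) := by omega
      rw [show ((i - (m + 1) : Nat) : Int) = (i : Int) - ((m : Int) + 1) from hidx]
      rw [aPop_shift kq nums.length m i (nums.getD m 0) nums[i] hstop s]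
      set s1 := aPop ((kq : Int) - 1) ((nums.length : Int) - ((m : Int) + 1))
          ((i : Int) - ((m : Int) + 1)) nums[i] s with hs1
      have hlen : (((s1 ++ [nums.getD m 0]).length : Nat) : Int) = (s1.length : Int) + 1 := by
        simp
      by_cases hc : ((s1.length : Int) < (kq : Int) - 1)
      · have hc2 : (((s1 ++ [nums.getD m 0]).length : Nat) : Int) < (kq : Int) := by omega
        rw [if_pos hc, if_pos hc2]
        have : nums[i] :: (s1 ++ [nums.getD m 0]) = (nums[i] :: s1) ++ [nums.getD m 0] := by simp
        rw [this]
        have := ih (i + 1) (nums[i] :: s1) (by omega) (by omega)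
        rw [show (i + 1) - (m + 1) = (i - (m + 1)) + 1 from by omega] at this
        exact this
      · have hc2 : ¬ ((((s1 ++ [nums.getD m 0]).length : Nat) : Int) < (kq : Int)) := by omega
        rw [if_neg hc, if_neg hc2]
        have := ih (i + 1) s1 (by omega) (by omega)
        rw [show (i + 1) - (m + 1) = (i - (m + 1)) + 1 from by omega] at this
        exact this

-- the main induction: for 0 ≤ kq ≤ |nums|, A's stack run equals B's window greedy
theorem main_eq : ∀ (kq : Nat) (nums : List Int), kq ≤ nums.length →
    (aGo (kq : Int) (nums.length : Int) 0 [] nums).reverse = bLoop nums nums.length 0 kq := by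
  intro kq
  induction kq with
  | zero =>
      intro nums _
      simp only [Nat.cast_zero]
      rw [aGo_nonpos 0 (nums.length : Int) (le_refl 0) nums 0]
      rfl
  | succ kq ih =>
      intro nums hk
      set N := nums.length with hN
      have he : N - (kq + 1) + 1 = N - kq := by omega
      set e := N - kq with hee
      have h0e : 0 < e := by omega
      obtain ⟨⟨_, hm2⟩, hmax, hstrict⟩ := bestIdx_window nums 0 e h0e
      set m := bestIdx nums 0 (0 + 1) e with hmm
      have hmk : m + (kq + 1) ≤ N := by omega
      -- A side
      have hA : aGo ((kq + 1 : Nat) : Int) (N : Int) 0 [] nums =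
          (aGo (kq : Int) ((N : Int) - ((m : Int) + 1)) 0 [] (nums.drop (m + 1))) ++ [nums.getD m 0] := by
        have h1 := phase1 nums (kq + 1) m (by omega) hmk
          (fun j hj => hstrict j (by omega) hj) m 0 [] (by omega) (by simp)
        rw [show nums.drop 0 = nums from rfl] at h1
        have h2 := phase2 nums (kq + 1) m (by omega) hmk
          (fun j hj => hmax j (by omega) (by omega)) (N - (m + 1)) (m + 1) [] (by omega) (le_refl _)
        simp only [List.nil_append] at h2
        rw [show (m + 1) - (m + 1) = 0 from by omega] at h2
        have hcast : (((kq + 1 : Nat)) : Int) - 1 = (kq : Int) := by push_cast; omega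
        rw [hcast] at h2
        calc aGo ((kq + 1 : Nat) : Int) (N : Int) 0 [] nums
            = aGo ((kq + 1 : Nat) : Int) (N : Int) (m + 1) [nums.getD m 0] (nums.drop (m + 1)) := h1
          _ = (aGo (kq : Int) ((N : Int) - ((m : Int) + 1)) 0 [] (nums.drop (m + 1)))
              ++ [nums.getD m 0] := h2
      rw [hA, List.reverse_append]
      simp only [List.reverse_singleton, List.singleton_append]
      have hlen : ((nums.drop (m + 1)).length : Int) = (N : Int) - ((m : Int) + 1) := by
        rw [List.length_drop]; omega
      rw [← hlen]
      rw [ih (nums.drop (m + 1)) (by rw [List.length_drop]; omega)]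
      -- B side
      rw [bLoop]
      rw [he, ← hmm]
      congr 1
      rw [List.length_drop, ← hN]
      have := bLoop_shift nums kq (m + 1) (m + 1) (le_refl _) (by omega)
      rw [show (m + 1) - (m + 1) = 0 from by omega] at this
      rw [← hN] at this
      exact this.symm

-- ===== VERDICT (by name: the statement is the Claim_ definition above) =====
theorem maxLexicographical_spec : Claim_equal_maxLexicographical := by
  intro nums k _
  unfold Spec_maxLexicographical maxLexicographical maxLexicographical_alt
  show (aGo k (nums.length : Int) 0 [] nums).reverse =
      bLoop nums nums.length 0 ((min k ((nums.length : Nat) : Int)).toNat)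
  by_cases hk : k ≤ 0
  · have h0 : (min k (nums.length : Int)).toNat = 0 := by
      simp [Int.toNat_eq_zero]; omega
    rw [h0]
    rw [aGo_nonpos k (nums.length : Int) hk nums 0]
    rfl
  · rw [not_le] at hk
    by_cases hkN : k ≤ (nums.length : Int)
    · have hmin : (min k (nums.length : Int)).toNat = k.toNat := by
        rw [min_eq_left hkN]
      have hcast : ((k.toNat : Nat) : Int) = k := Int.toNat_of_nonneg (by omega)
      rw [hmin, ← hcast]
      exact main_eq k.toNat nums (by omega)
    · rw [not_le] at hkN
      have hmin : (min k (nums.length : Int)).toNat = nums.length := by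
        rw [min_eq_right (le_of_lt hkN)]; simp
      rw [hmin]
      rw [aGo_ge k (nums.length : Int) (le_of_lt hkN) nums 0 [] (by simp) (by simp)]
      rw [bLoop_full nums nums.length 0 (by omega)]
      simp
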